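-- pv_equiv track=rewrite | github.com/k-min9/TIL | 00. Daily Algorithm/Programmers/Li2021_04.숫자에 맞게 배열 분배하기.py | solution
-- ===== SOURCE A (Python) =====
-- def solution(n):
--
--     def divide(answers, depth):
--         # 혹시 몰라서
--         if not answers:
--             return None
--         if len(answers) == 1:
--             return answers
--
--         num = nums[depth]
--         ret = list()
--         for i in range(num):
--             ret += divide(answers[i::num], depth + 1)
--         return ret
--
--     # 소인수 분해
--     nums = list()
--     temp = n
--     d = 2
--     while temp != 1:
--         if temp % d == 0:
--             nums.append(d)
--             temp = temp //d
--         else: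
--             d += 1
--
--     # 시작
--     return divide(list(range(1,n+1)), 0)
-- ===== SOURCE B (Python) =====
-- def solution(n):
--     # prime factors in nondecreasing order (same trial division as the original)
--     nums = []
--     temp, d = n, 2
--     while temp != 1:
--         if temp % d == 0:
--             nums.append(d)
--             temp //= d
--         else:
--             d += 1
--
--     # one pass: output position p takes value src(p)+1, where src(p) decodes p's
--     # mixed-radix digits (most significant first) back into the source index
--     def src(p):
--         j, mul, w = 0, 1, n
--         for m in nums:
--             w //= m
--             j += (p // w) % m * mul
--             mul *= m
--         return j
--
--     return [src(p) + 1 for p in range(n)]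
-- ===== Notes on version B (the rewrite author's own statement) =====
-- stated objective: alternative
-- what changed: replaces the recursive slice-and-concatenate shuffle with a single non-recursive pass that computes each output entry directly by mixed-radix digit decoding of its position over the prime-factor list
import Mathlib
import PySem

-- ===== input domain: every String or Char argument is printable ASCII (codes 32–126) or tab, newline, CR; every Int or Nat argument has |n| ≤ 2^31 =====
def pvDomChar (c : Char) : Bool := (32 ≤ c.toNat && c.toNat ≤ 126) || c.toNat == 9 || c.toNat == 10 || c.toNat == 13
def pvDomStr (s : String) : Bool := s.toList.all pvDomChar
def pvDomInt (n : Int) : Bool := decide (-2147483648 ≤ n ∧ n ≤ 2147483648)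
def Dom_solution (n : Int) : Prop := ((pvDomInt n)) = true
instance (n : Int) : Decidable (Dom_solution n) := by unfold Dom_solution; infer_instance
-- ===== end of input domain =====

-- B replaces A's recursive slice-and-concatenate shuffle by a single pass that decodes
-- each output position's mixed-radix digits directly (alternative decomposition, not faster).

-- ===== PORT A =====
-- A's while-loop trial division; fuel 2*n.toNat+2 is proven sufficient for n ≥ 1 below
def factA (fuel : Nat) (temp d : Int) : List Int :=
  match fuel with
  | 0 => []
  | fuel + 1 =>
    if temp = 1 then []
    else if PySem.Int.mod temp d = 0 then
      d :: factA fuel (PySem.Int.floordiv temp d) d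
    else
      factA fuel temp (d + 1)

-- A's recursive divide; fuel nums.length+1 bounds the recursion depth (proved below)
def divideA (fuel : Nat) (nums : List Int) (answers : List Int) (depth : Int) : List Int :=
  match fuel with
  | 0 => []                                   -- fuel exhaustion: unreachable for n ≥ 1
  | fuel + 1 =>
    if answers = [] then []                   -- Python returns None here: unreachable for n ≥ 1
    else if answers.length = 1 then answers
    else
      match PySem.List.pyGet? nums depth with
      | none => []                            -- IndexError: unreachable for n ≥ 1
      | some num =>
        (PySem.List.pyRange 0 num 1).foldl
          (fun ret i =>
            ret ++ divideA fuel nums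
                     ((PySem.List.slice? answers (some i) none num).getD []) (depth + 1))
          []

def solution (n : Int) : List Int :=
  let nums := factA (2 * n.toNat + 2) n 2
  divideA (nums.length + 1) nums (PySem.List.pyRange 1 (n + 1) 1) 0

-- ===== PORT B =====
-- same trial-division while loop as the original (B keeps it verbatim)
def factB (fuel : Nat) (temp d : Int) : List Int :=
  match fuel with
  | 0 => []
  | fuel + 1 =>
    if temp = 1 then []
    else if PySem.Int.mod temp d = 0 then
      d :: factB fuel (PySem.Int.floordiv temp d) d
    else
      factB fuel temp (d + 1)

-- B's inner loop: state (j, mul, w); for m in nums: w //= m; j += (p // w) % m * mul; mul *= m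
def srcB (nums : List Int) (n p : Int) : Int :=
  (nums.foldl
    (fun (s : Int × Int × Int) m =>
      let w := PySem.Int.floordiv s.2.2 m
      (s.1 + PySem.Int.mod (PySem.Int.floordiv p w) m * s.2.1, s.2.1 * m, w))
    (0, 1, n)).1

def solution_alt (n : Int) : List Int :=
  let nums := factB (2 * n.toNat + 2) n 2
  (PySem.List.pyRange 0 n 1).map (fun p => srcB nums n p + 1)

-- ===== PRECONDITION & SPEC =====
-- Pre_ excludes n ≤ 0, where A's factorisation loop never terminates (A diverges, returns nothing).
def Pre_solution (n : Int) : Prop := 1 ≤ n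
instance (n : Int) : Decidable (Pre_solution n) := by unfold Pre_solution; infer_instance
def pvWitness_solution : Int := (12)

def Spec_solution (n : Int) (out : List Int) : Prop := out = solution_alt n
instance (n : Int) (out : List Int) : Decidable (Spec_solution n out) := by unfold Spec_solution; infer_instance

-- ===== CLAIM (what is proved, stated in full; the proofs are below) =====
def Claim_equal_solution : Prop := ∀ (n : Int), Dom_solution n → Pre_solution n → Spec_solution n (solution n)

-- ===== LEMMAS AND PROOFS =====

def pN (ms : List Int) : Nat := (ms.map Int.toNat).prod
def srcIdx : List Int → Nat → Nat
  | [], _ => 0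
  | m :: ms, p => p / pN ms + m.toNat * srcIdx ms (p % pN ms)

theorem pN_pos (ms : List Int) (h : ∀ m ∈ ms, 2 ≤ m) : 0 < pN ms := by
  induction ms with
  | nil => simp [pN]
  | cons m ms ih =>
    have h1 := h m (by simp)
    have h2 : 0 < pN ms := ih (fun x hx => h x (by simp [hx]))
    simp only [pN, List.map_cons, List.prod_cons]
    have : 0 < m.toNat := by omega
    exact Nat.mul_pos this h2

theorem pN_cast (ms : List Int) (h : ∀ m ∈ ms, 2 ≤ m) : (pN ms : Int) = ms.prod := by
  induction ms with
  | nil => simp [pN]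
  | cons m ms ih =>
    have h1 := h m (by simp)
    have h2 := ih (fun x hx => h x (by simp [hx]))
    simp only [pN, List.map_cons, List.prod_cons] at *
    push_cast [← h2]
    congr 1
    omega

theorem srcIdx_lt (ms : List Int) : ∀ (p : Nat), (∀ m ∈ ms, 2 ≤ m) → p < pN ms →
    srcIdx ms p < pN ms := by
  induction ms with
  | nil => intro p h hp; simp only [srcIdx]; simp [pN] at hp ⊢
  | cons m ms ih =>
    intro p h hp
    have h1 := h m (by simp)
    have hW : 0 < pN ms := pN_pos ms (fun x hx => h x (by simp [hx]))
    have hmem : ∀ x ∈ ms, (2:Int) ≤ x := fun x hx => h x (by simp [hx])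
    have hrec := ih (p % pN ms) hmem (Nat.mod_lt _ hW)
    simp only [srcIdx]
    have hpN : pN (m :: ms) = m.toNat * pN ms := by simp [pN]
    rw [hpN] at hp ⊢
    have hdiv : p / pN ms < m.toNat := Nat.div_lt_of_lt_mul (by rw [Nat.mul_comm] at hp; omega)
    have h2 : m.toNat * (srcIdx ms (p % pN ms) + 1) ≤ m.toNat * pN ms :=
      Nat.mul_le_mul_left _ hrec
    rw [Nat.mul_succ] at h2
    omega

theorem factB_eq_factA (fuel : Nat) : ∀ temp d : Int, factB fuel temp d = factA fuel temp d := by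
  induction fuel with
  | zero => intro temp d; rfl
  | succ fuel ih =>
    intro temp d
    simp only [factB, factA]
    split_ifs <;> simp [ih]

theorem factA_spec : ∀ (fuel : Nat) (temp d : Int), 1 ≤ temp → 2 ≤ d →
    (temp = 1 ∨ d ≤ temp) → (∀ k : Int, 2 ≤ k → k < d → ¬ k ∣ temp) →
    (2 * temp - d).toNat + 1 ≤ fuel →
    (factA fuel temp d).prod = temp ∧ ∀ m ∈ factA fuel temp d, 2 ≤ m := by
  intro fuel
  induction fuel with
  | zero => intro temp d _ _ _ _ hf; omega
  | succ fuel ih =>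
    intro temp d h1 hd hdt hnodvd hf
    by_cases ht1 : temp = 1
    · subst ht1; simp [factA]
    · have hdle : d ≤ temp := by rcases hdt with h | h; omega; exact h
      have ht2 : 2 ≤ temp := by omega
      by_cases hdvd : PySem.Int.mod temp d = 0
      · -- d divides temp
        have hdvd' : d ∣ temp := (PySem.Int.mod_eq_zero_iff_dvd temp d).mp hdvd
        have hfd : PySem.Int.floordiv temp d = temp / d :=
          PySem.Int.floordiv_eq_ediv_of_pos (by omega)
        obtain ⟨q, hq⟩ := hdvd'
        have hqpos : 1 ≤ q := by nlinarith
        have hq' : temp / d = q := by rw [hq]; rw [Int.mul_ediv_cancel_left _ (by omega)]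
        have hqlt : q < temp := by nlinarith
        -- q has no divisor in [2, d)
        have hq_nodvd : ∀ k : Int, 2 ≤ k → k < d → ¬ k ∣ q := by
          intro k hk2 hkd hkq
          exact hnodvd k hk2 hkd (hq ▸ Dvd.dvd.mul_left hkq d)
        -- q = 1 or d ≤ q
        have hq_cases : q = 1 ∨ d ≤ q := by
          by_cases hq1 : q = 1
          · exact Or.inl hq1
          · right
            by_contra hlt
            exact hq_nodvd q (by omega) (by omega) dvd_rfl
        have hfuel : (2 * q - d).toNat + 1 ≤ fuel := by omega
        simp only [factA, if_neg ht1, if_pos hdvd, hfd, hq']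
        obtain ⟨hprod, hmem⟩ := ih q d hqpos hd hq_cases hq_nodvd hfuel
        constructor
        · simp [hprod, hq]
        · intro m hm
          rcases List.mem_cons.mp hm with h | h
          · omega
          · exact hmem m h
      · -- d does not divide temp
        have hndvd' : ¬ d ∣ temp := fun h => hdvd ((PySem.Int.mod_eq_zero_iff_dvd temp d).mpr h)
        have hdlt : d < temp := by
          rcases lt_or_eq_of_le hdle with h | h
          · exact h
          · exact absurd (h ▸ dvd_rfl) hndvd'
        have hnodvd' : ∀ k : Int, 2 ≤ k → k < d + 1 → ¬ k ∣ temp := by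
          intro k hk2 hkd
          by_cases hkeq : k = d
          · exact hkeq ▸ hndvd'
          · exact hnodvd k hk2 (by omega)
        simp only [factA, if_neg ht1, if_neg hdvd]
        exact ih temp (d + 1) h1 (by omega) (Or.inr (by omega)) hnodvd' (by omega)

theorem slice_stride (xs : List Int) (i m W : Nat) (him : i < m) (hW : 0 < W)
    (hlen : xs.length = m * W) :
    PySem.List.slice? xs (some (i : Int)) none (m : Int)
      = some ((List.range W).map (fun k => xs.getD (i + m * k) 0)) := by
  have hm0 : (m : Int) ≠ 0 := by omega
  have hilen : (i : Int) < (xs.length : Int) := by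
    have : i < m * W := lt_of_lt_of_le him (Nat.le_mul_of_pos_right m hW)
    omega
  unfold PySem.List.slice? PySem.List.sliceIndices
  rw [if_neg hm0]
  have hstep : ¬ ((m:Int) < 0) := by omega
  simp only [if_neg hstep]
  -- start = clamp (some i) _ : i ≥ 0 so = min i len = i; stop (none) = len
  have hstart : (if (i:Int) < 0 then max ((i:Int) + (xs.length:Int)) 0 else min (i:Int) (xs.length:Int)) = (i:Int) := by
    rw [if_neg (by omega)]
    omega
  rw [hstart]
  have hpos : (0:Int) < (m:Int) := by omega
  rw [if_pos hpos, if_pos hilen]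
  -- count = ((len - i + m - 1) / m).toNat = W
  have hcount : (((xs.length:Int) - (i:Int) + (m:Int) - 1) / (m:Int)).toNat = W := by
    have h1 : (xs.length:Int) - (i:Int) + (m:Int) - 1 = ((m:Int) - 1 - (i:Int)) + (m:Int) * (W:Int) := by
      push_cast [hlen]; ring
    rw [h1]
    rw [Int.add_mul_ediv_left _ _ hm0]
    rw [Int.ediv_eq_zero_of_lt (by omega) (by omega)]
    omega
  rw [hcount]
  congr 1
  rw [List.filterMap_eq_map_iff_forall_eq_some.mpr ?_]
  intro k hk
  rw [List.mem_range] at hk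
  have hidx : ((i:Int) + (m:Int) * (k:Int)).toNat = i + m * k := by omega
  rw [hidx]
  rw [List.getElem?_eq_getElem (by
    have h2 : m * (k+1) ≤ m * W := Nat.mul_le_mul_left m hk
    rw [Nat.mul_succ] at h2
    omega)]
  rw [List.getD_eq_getElem _ _ (by
    have h2 : m * (k+1) ≤ m * W := Nat.mul_le_mul_left m hk
    rw [Nat.mul_succ] at h2
    omega)]

theorem srcB_spec : ∀ (ms : List Int) (p j mul : Int), (∀ m ∈ ms, 2 ≤ m) → 0 ≤ p →
    (ms.foldl
      (fun (s : Int × Int × Int) m =>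
        let w := PySem.Int.floordiv s.2.2 m
        (s.1 + PySem.Int.mod (PySem.Int.floordiv p w) m * s.2.1, s.2.1 * m, w))
      (j, mul, (pN ms : Int))).1
      = j + mul * (srcIdx ms (p.toNat % pN ms) : Int) := by
  intro ms
  induction ms with
  | nil => intro p j mul h hp; simp [srcIdx]
  | cons m ms ih =>
    intro p j mul h hp
    have hm : (2:Int) ≤ m := h m (by simp)
    have hW : 0 < pN ms := pN_pos ms (fun x hx => h x (by simp [hx]))
    have hmem : ∀ x ∈ ms, (2:Int) ≤ x := fun x hx => h x (by simp [hx])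
    simp only [List.foldl_cons]
    -- w' = (pN (m::ms) : Int) // m = pN ms
    have hpN : pN (m :: ms) = m.toNat * pN ms := by simp [pN]
    have hw : PySem.Int.floordiv ((pN (m :: ms) : Int)) m = (pN ms : Int) := by
      rw [PySem.Int.floordiv_eq_ediv_of_pos (by omega), hpN]
      push_cast
      rw [show ((m.toNat : Int)) = m by omega]
      exact Int.mul_ediv_cancel_left _ (by omega)
    -- digit = (p // W) % m
    have hfd : PySem.Int.floordiv p ((pN ms : Int)) = ((p.toNat / pN ms : Nat) : Int) := by
      rw [PySem.Int.floordiv_eq_ediv_of_pos (by omega)]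
      rw [show p = ((p.toNat : Nat) : Int) by omega]
      exact_mod_cast (Int.natCast_div p.toNat (pN ms)).symm
    have hdig : PySem.Int.mod ((p.toNat / pN ms : Nat) : Int) m
        = ((p.toNat / pN ms % m.toNat : Nat) : Int) := by
      rw [PySem.Int.mod_eq_emod_of_pos (by omega)]
      rw [show m = ((m.toNat : Nat) : Int) by omega]
      exact_mod_cast (Int.natCast_mod (p.toNat / pN ms) m.toNat).symm
    rw [hw]
    simp only [hfd, hdig]
    rw [ih p (j + ((p.toNat / pN ms % m.toNat : Nat) : Int) * mul) (mul * m) hmem hp]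
    -- arithmetic: j + d*mul + mul*m*s' = j + mul*(d + m*s')
    simp only [srcIdx]
    have h1 : p.toNat % pN (m :: ms) / pN ms = p.toNat / pN ms % m.toNat := by
      rw [hpN, Nat.mul_comm]
      exact Nat.mod_mul_right_div_self p.toNat (pN ms) m.toNat
    have h2 : p.toNat % pN (m :: ms) % pN ms = p.toNat % pN ms := by
      rw [hpN]
      exact Nat.mod_mod_of_dvd _ ⟨m.toNat, Nat.mul_comm _ _⟩
    rw [h1, h2]
    push_cast
    rw [show ((m.toNat : Int)) = m by omega]
    ring

theorem range_mul_flatMap (a b : Nat) (f : Nat → Int) :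
    (List.range (a * b)).map f
      = (List.range a).flatMap (fun i => (List.range b).map (fun q => f (i * b + q))) := by
  induction a with
  | zero => simp
  | succ a ih =>
    rw [Nat.succ_mul, List.range_add, List.map_append, ih, List.range_succ,
        List.flatMap_append]
    simp only [List.flatMap_cons, List.flatMap_nil, List.append_nil, List.map_map]
    rfl

theorem divideA_spec : ∀ (ms nums xs : List Int) (dk : Nat),
    nums.drop dk = ms → (∀ m ∈ nums, 2 ≤ m) → xs.length = pN ms →
    divideA (ms.length + 1) nums xs (dk : Int)
      = (List.range (pN ms)).map (fun p => xs.getD (srcIdx ms p) 0) := by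
  intro ms
  induction ms with
  | nil =>
    intro nums xs dk hdrop hnums hlen
    simp only [pN, List.map_nil, List.prod_nil] at hlen ⊢
    match xs, hlen with
    | [x], _ =>
      simp [divideA, srcIdx]
  | cons m ms ih =>
    intro nums xs dk hdrop hnums hlen
    have hmem : ∀ x ∈ ms, (2:Int) ≤ x := by
      intro x hx
      exact hnums x (List.mem_of_mem_drop (hdrop ▸ List.mem_cons_of_mem m hx))
    have hm : (2:Int) ≤ m :=
      hnums m (List.mem_of_mem_drop (hdrop ▸ List.mem_cons_self ..))
    have hW : 0 < pN ms := pN_pos ms hmem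
    have hpN : pN (m :: ms) = m.toNat * pN ms := by simp [pN]
    have hlen2 : 2 ≤ xs.length := by
      rw [hlen, hpN]
      calc 2 = 2 * 1 := rfl
        _ ≤ m.toNat * pN ms := Nat.mul_le_mul (by omega) hW
    have hxs_ne : xs ≠ [] := by intro h; rw [h] at hlen2; simp at hlen2
    -- nums[dk] = m
    have hdk : dk < nums.length := by
      by_contra h
      rw [List.drop_eq_nil_of_le (by omega)] at hdrop
      exact absurd hdrop.symm (List.cons_ne_nil _ _)
    have hget : nums[dk] = m := by
      have h0 : (nums.drop dk)[0]'(by simp [hdrop]) = m := by simp [hdrop]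
      rw [List.getElem_drop] at h0
      simpa using h0
    have hpy : PySem.List.pyGet? nums (dk : Int) = some m := by
      rw [PySem.List.pyGet?_natCast, List.getElem?_eq_getElem hdk, hget]
    simp only [divideA, if_neg hxs_ne, if_neg (by omega : ¬ xs.length = 1), hpy]
    -- the loop: range over m
    rw [PySem.List.pyRange_one, show ((m:Int) - 0).toNat = m.toNat by omega,
        List.foldl_map, PySem.List.foldl_append_eq_flatMap, List.nil_append]
    rw [hpN, range_mul_flatMap]
    apply List.flatMap_congr
    intro i hi
    rw [List.mem_range] at hi
    -- slice xs[i::m] = stride list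
    have hslice := slice_stride xs i m.toNat (pN ms) hi hW (by rw [hlen, hpN])
    rw [show ((m.toNat:Nat):Int) = m by omega] at hslice
    simp only [zero_add, List.length_cons, hslice, Option.getD_some]
    have hdrop' : nums.drop (dk + 1) = ms := by
      rw [← List.tail_drop, hdrop, List.tail_cons]
    have hcast : ((dk:Int) + 1) = (((dk+1 : Nat)) : Int) := by push_cast; ring
    rw [hcast, ih nums _ (dk+1) hdrop' hnums (by simp)]
    apply List.map_congr_left
    intro q hq
    rw [List.mem_range] at hq
    have hs := srcIdx_lt ms q hmem hq
    rw [PySem.List.getD_map_range _ _ _ _ hs]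
    congr 1
    simp only [srcIdx]
    have e1 : (i * pN ms + q) / pN ms = i := by
      rw [Nat.mul_comm, Nat.mul_add_div hW, Nat.div_eq_of_lt hq]
      omega
    have e2 : (i * pN ms + q) % pN ms = q := by
      rw [Nat.add_comm, Nat.add_mul_mod_self_right, Nat.mod_eq_of_lt hq]
    rw [e1, e2]

-- ===== VERDICT (by name: the statement is the Claim_ definition above) =====
theorem solution_spec : Claim_equal_solution := by
  unfold Claim_equal_solution Spec_solution Pre_solution
  intro n _ h1
  simp only [solution, solution_alt, factB_eq_factA]
  set nums := factA (2 * n.toNat + 2) n 2 with hnums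
  obtain ⟨hprod, hmem⟩ := factA_spec (2 * n.toNat + 2) n 2 h1 (by omega)
    (by omega) (fun k hk2 hkd _ => absurd hkd (by omega)) (by omega)
  have hpn : (pN nums : Int) = n := by rw [pN_cast nums hmem, hprod]
  have hpnn : pN nums = n.toNat := by omega
  have hxs : PySem.List.pyRange 1 (n + 1) 1
      = (List.range n.toNat).map (fun k => (1 : Int) + (k : Nat)) := by
    rw [PySem.List.pyRange_one, show ((n : Int) + 1 - 1).toNat = n.toNat by omega]
  have hlen : (PySem.List.pyRange 1 (n + 1) 1).length = pN nums := by
    rw [hxs, List.length_map, List.length_range, hpnn]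
  have hA := divideA_spec nums nums (PySem.List.pyRange 1 (n + 1) 1) 0
    List.drop_zero hmem hlen
  rw [show ((0 : Nat) : Int) = (0 : Int) by omega] at hA
  rw [hA, hpnn]
  rw [hxs, PySem.List.pyRange_one 0 n, show ((n : Int) - 0).toNat = n.toNat by omega,
      List.map_map]
  apply List.map_congr_left
  intro k hk
  rw [List.mem_range] at hk
  have hs := srcIdx_lt nums k hmem (by omega)
  rw [PySem.List.getD_map_range _ _ _ _ (by omega)]
  simp only [Function.comp_apply, zero_add]
  unfold srcB
  have hb := srcB_spec nums ((k : Nat) : Int) 0 1 hmem (by omega)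
  rw [hpn] at hb
  rw [hb]
  have hmod : ((k : Nat) : Int).toNat % pN nums = k := by
    rw [Int.toNat_natCast, hpnn, Nat.mod_eq_of_lt hk]
  rw [hmod]
  ring
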